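-- pv_equiv track=rewrite | github.com/AtharvaParanjpe/Dynamic-Fact-Ranking-For-Entity-Centric-Queries | main/bert_without_fine_tuning.py | getBertParameters
-- ===== SOURCE A (Python) =====
-- maxLengthPadding = 50
--
-- def getBertParameters(tokens):
--     attn_mask = []
--     seg_ids = []
--     # pos_ids = []
--     if(len(tokens)<maxLengthPadding):
--         attn_mask = [1]*len(tokens) + [0]*(maxLengthPadding-len(tokens))
--     else:
--         attn_mask = [1]*maxLengthPadding
--
--     segment = 0
--     for x in tokens:
--         seg_ids.append(segment)
--         if(x=='[SEP]'):
--             segment = 1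
--     seg_ids+=[0]*(maxLengthPadding-len(tokens))
--     return attn_mask,seg_ids
-- ===== SOURCE B (Python) =====
-- maxLengthPadding = 50
--
-- def getBertParameters(tokens):
--     n = len(tokens)
--     pad = [0] * (maxLengthPadding - n)
--     attn_mask = [1] * min(n, maxLengthPadding) + pad
--     if '[SEP]' in tokens:
--         i = tokens.index('[SEP]')
--         seg_ids = [0] * (i + 1) + [1] * (n - i - 1)
--     else:
--         seg_ids = [0] * n
--     return attn_mask, seg_ids + pad
-- ===== Notes on version B (the rewrite author's own statement) =====
-- stated objective: simpler
-- what changed: seg_ids is built by locating the first '[SEP]' with index() and concatenating a [0]*(i+1) prefix with a [1]*rest suffix, instead of the accumulator-flag single pass; attn_mask uses min(n,50) instead of an if/else.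
import Mathlib
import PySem

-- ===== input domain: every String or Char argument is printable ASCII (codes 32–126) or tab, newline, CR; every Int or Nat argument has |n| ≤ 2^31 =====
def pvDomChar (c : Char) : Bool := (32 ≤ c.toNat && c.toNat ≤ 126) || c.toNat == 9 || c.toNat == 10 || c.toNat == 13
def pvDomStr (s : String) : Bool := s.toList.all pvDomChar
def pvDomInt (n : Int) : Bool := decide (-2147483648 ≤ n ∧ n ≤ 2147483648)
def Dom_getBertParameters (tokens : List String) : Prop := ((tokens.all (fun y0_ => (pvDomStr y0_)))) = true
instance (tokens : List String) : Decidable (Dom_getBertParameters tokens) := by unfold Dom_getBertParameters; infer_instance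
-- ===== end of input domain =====

-- B builds seg_ids by locating the first '[SEP]' with index() and concatenating a zeros prefix
-- with a ones suffix, instead of A's accumulator-flag single pass (objective: simpler).

-- ===== PORT A =====
def getBertParameters (tokens : List String) : List Int × List Int :=
  let attn_mask : List Int :=
    if tokens.length < 50 then
      List.replicate tokens.length (1 : Int) ++ List.replicate (50 - tokens.length) (0 : Int)
    else
      List.replicate 50 (1 : Int)
  -- the for-loop: seg_ids accumulates the flag, which flips to 1 after '[SEP]'
  let st := tokens.foldl
    (fun (st : List Int × Int) x => (st.1 ++ [st.2], if x = "[SEP]" then 1 else st.2))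
    ([], 0)
  (attn_mask, st.1 ++ List.replicate (50 - tokens.length) (0 : Int))

-- ===== PORT B =====
def getBertParameters_alt (tokens : List String) : List Int × List Int :=
  let n := tokens.length
  let pad : List Int := List.replicate (50 - n) 0
  let attn_mask : List Int := List.replicate (min n 50) 1 ++ pad
  let seg_ids : List Int :=
    match PySem.List.index? tokens "[SEP]" with
    | some i => List.replicate (i + 1) 0 ++ List.replicate (n - i - 1) 1
    | none => List.replicate n 0
  (attn_mask, seg_ids ++ pad)

-- ===== PRECONDITION & SPEC =====
def Spec_getBertParameters (tokens : List String) (out : List Int × List Int) : Prop := out = getBertParameters_alt tokens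
instance (tokens : List String) (out : List Int × List Int) : Decidable (Spec_getBertParameters tokens out) := by unfold Spec_getBertParameters; infer_instance

-- ===== CLAIM (what is proved, stated in full; the proofs are below) =====
def Claim_equal_getBertParameters : Prop := ∀ (tokens : List String), Dom_getBertParameters tokens → Spec_getBertParameters tokens (getBertParameters tokens)

-- ===== LEMMAS AND PROOFS =====

-- B's seg_ids construction, as a standalone expression
def segB (tokens : List String) : List Int :=
  match PySem.List.index? tokens "[SEP]" with
  | some i => List.replicate (i + 1) 0 ++ List.replicate (tokens.length - i - 1) 1
  | none => List.replicate tokens.length 0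

-- once the flag is 1 it stays 1: the loop only appends 1s
theorem segLoop_one (tokens : List String) (acc : List Int) :
    tokens.foldl (fun (st : List Int × Int) x => (st.1 ++ [st.2], if x = "[SEP]" then 1 else st.2))
      (acc, 1)
    = (acc ++ List.replicate tokens.length 1, 1) := by
  induction tokens generalizing acc with
  | nil => simp
  | cons t ts ih =>
    simp only [List.foldl_cons, ite_self]
    rw [ih]
    simp [List.replicate_succ, List.append_assoc]

-- A's loop started with flag 0 produces exactly B's split construction
theorem segLoop_zero (tokens : List String) (acc : List Int) :
    (tokens.foldl (fun (st : List Int × Int) x => (st.1 ++ [st.2], if x = "[SEP]" then 1 else st.2))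
      (acc, 0)).1
    = acc ++ segB tokens := by
  induction tokens generalizing acc with
  | nil => simp [segB, PySem.List.index?]
  | cons t ts ih =>
    by_cases h : t = "[SEP]"
    · subst h
      simp only [List.foldl_cons, if_true]
      rw [segLoop_one]
      unfold segB
      rw [PySem.List.index?_cons_self]
      simp [List.replicate_succ, List.append_assoc]
    · simp only [List.foldl_cons, if_neg h]
      rw [ih]
      unfold segB
      rw [PySem.List.index?_cons_of_ne ts h]
      cases hix : PySem.List.index? ts "[SEP]" with
      | none => simp [List.replicate_succ, List.append_assoc]
      | some i => simp [List.replicate_succ, List.append_assoc, Nat.succ_sub_succ]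

-- the two attention masks coincide
theorem attn_eq (n : Nat) :
    (if n < 50 then List.replicate n (1 : Int) ++ List.replicate (50 - n) (0 : Int)
     else List.replicate 50 (1 : Int))
    = List.replicate (min n 50) (1 : Int) ++ List.replicate (50 - n) (0 : Int) := by
  split_ifs with h
  · rw [Nat.min_eq_left (Nat.le_of_lt h)]
  · rw [Nat.min_eq_right (Nat.le_of_not_lt h), Nat.sub_eq_zero_of_le (Nat.le_of_not_lt h)]
    simp

-- ===== VERDICT (by name: the statement is the Claim_ definition above) =====
theorem getBertParameters_spec : Claim_equal_getBertParameters := by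
  intro tokens _
  unfold Spec_getBertParameters getBertParameters getBertParameters_alt
  refine Prod.ext ?_ ?_
  · exact attn_eq tokens.length
  · have h := segLoop_zero tokens []
    simp only [List.nil_append] at h
    simp only [h]
    rfl
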